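-- pv_equiv track=rewrite | github.com/sudoneoox/CodePath-TIP-102 | Unit 2/Advanced/Session_1/problem6.py | organize_pirate_crew
-- ===== SOURCE A (Python) =====
-- from collections import defaultdict
-- from typing import DefaultDict, Dict, List
--
-- def organize_pirate_crew(group_sizes: List[int]) -> List[List[int]]:
--     # each bucket should hold max group_sizes[i]
--     result: List[List[int]] = []
--     size_groups: DefaultDict = defaultdict(lambda: defaultdict(list))
--
--     for idx, size in enumerate(group_sizes):
--         bucket_num: int = 0
--         while len(size_groups[size][bucket_num]) >= size:
--             bucket_num += 1
--
--         # add pirate to this group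
--         size_groups[size][bucket_num].append(idx)
--
--     for size in size_groups:
--         for bucket_num in size_groups[size]:
--             result.append(size_groups[size][bucket_num])
--
--     return result
-- ===== SOURCE B (Python) =====
-- def organize_pirate_crew(group_sizes):
--     # one pass: per size keep its bucket list; append to the last bucket or start a new one
--     buckets = {}
--     for idx, size in enumerate(group_sizes):
--         bs = buckets.setdefault(size, [])
--         if not bs or len(bs[-1]) >= size:
--             bs.append([])
--         bs[-1].append(idx)
--     return [b for bs in buckets.values() for b in bs]
-- ===== Notes on version B (the rewrite author's own statement) =====
-- stated objective: faster
-- what changed: A scans bucket 0,1,2,... of the size's group on every element to find the first non-full bucket (O(n^2) worst case); B keeps only the last bucket per size in a dict and either appends to it or starts a new one, one O(1) step per element (O(n)).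
import Mathlib
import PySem

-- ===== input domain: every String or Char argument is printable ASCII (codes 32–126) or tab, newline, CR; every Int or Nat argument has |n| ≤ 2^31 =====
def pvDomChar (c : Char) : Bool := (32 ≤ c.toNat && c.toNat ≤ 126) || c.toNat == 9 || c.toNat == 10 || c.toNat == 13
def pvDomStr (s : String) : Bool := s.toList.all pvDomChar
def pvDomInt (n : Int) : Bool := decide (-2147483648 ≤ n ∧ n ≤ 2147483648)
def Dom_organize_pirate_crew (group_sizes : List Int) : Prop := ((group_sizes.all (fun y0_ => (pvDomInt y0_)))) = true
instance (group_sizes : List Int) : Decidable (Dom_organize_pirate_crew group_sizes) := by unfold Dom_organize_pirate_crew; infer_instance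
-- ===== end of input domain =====

-- B replaces A's per-element linear scan for the first non-full bucket by keeping only the
-- last bucket per size (append or start new), one pass; same return value (A mutates nothing).


-- ===== PORT A =====
-- the inner 'while len(size_groups[size][bucket_num]) >= size: bucket_num += 1' loop;
-- each defaultdict ACCESS inserts a missing key with value [].  The loop terminates after at
-- most (number of existing buckets)+1 tests when size ≥ 1 (buckets are keyed 0,1,2,…), so that
-- fuel suffices; for size ≤ 0 Python never terminates (excluded by Pre_ below).
def pvFindBucket (s : Int) : Nat → Int → PySem.Dict Int (List Int) → Int × PySem.Dict Int (List Int)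
  | 0, b, inner => (b, inner)
  | fuel+1, b, inner =>
    let inner' := if inner.contains b then inner else inner.insert b []
    if s ≤ ((inner'.getD b []).length : Int) then pvFindBucket s fuel (b+1) inner'
    else (b, inner')

-- one iteration of A's 'for idx, size in enumerate(group_sizes)' body
def pvStepA (outer : PySem.Dict Int (PySem.Dict Int (List Int))) (p : Int × Int) :
    PySem.Dict Int (PySem.Dict Int (List Int)) :=
  let inner0 := outer.getD p.2 PySem.Dict.empty
  let r := pvFindBucket p.2 (inner0.size + 1) 0 inner0
  let inner1 := r.2.insert r.1 (r.2.getD r.1 [] ++ [p.1])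
  outer.insert p.2 inner1

def organize_pirate_crew (group_sizes : List Int) : List (List Int) :=
  let size_groups := (PySem.List.enumerate group_sizes).foldl pvStepA PySem.Dict.empty
  -- 'for size in size_groups: for bucket_num in size_groups[size]: result.append(…)'
  size_groups.items.foldl (fun res q => q.2.items.foldl (fun res r => res ++ [r.2]) res) []

-- ===== PORT B =====
-- one iteration of B's loop: bs = buckets.setdefault(size, []); if not bs or len(bs[-1]) >= size:
-- bs.append([]); bs[-1].append(idx)   (mutation ported as a functional update of the entry)
def pvStepB (d : PySem.Dict Int (List (List Int))) (p : Int × Int) :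
    PySem.Dict Int (List (List Int)) :=
  let bs := d.getD p.2 []
  let bs1 := if bs = [] ∨ p.2 ≤ ((PySem.List.pyGetD bs (-1) []).length : Int) then bs ++ [[]] else bs
  let bs2 := bs1.dropLast ++ [PySem.List.pyGetD bs1 (-1) [] ++ [p.1]]
  d.insert p.2 bs2

def organize_pirate_crew_alt (group_sizes : List Int) : List (List Int) :=
  let buckets := (PySem.List.enumerate group_sizes).foldl pvStepB PySem.Dict.empty
  buckets.values.flatMap id

-- ===== PRECONDITION & SPEC =====
-- Pre_ excludes inputs containing a size ≤ 0: there A's inner while loop never terminates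
-- (len of a fresh bucket is 0 ≥ size), so A returns on exactly the inputs admitted here.
def Pre_organize_pirate_crew (group_sizes : List Int) : Prop := ∀ s ∈ group_sizes, 1 ≤ s
instance (group_sizes : List Int) : Decidable (Pre_organize_pirate_crew group_sizes) := by unfold Pre_organize_pirate_crew; infer_instance
def pvWitness_organize_pirate_crew : List Int := [2, 1, 2, 1, 2]

def Spec_organize_pirate_crew (group_sizes : List Int) (out : List (List Int)) : Prop := out = organize_pirate_crew_alt group_sizes
instance (group_sizes : List Int) (out : List (List Int)) : Decidable (Spec_organize_pirate_crew group_sizes out) := by unfold Spec_organize_pirate_crew; infer_instance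

-- ===== CLAIM (what is proved, stated in full; the proofs are below) =====
def Claim_equal_organize_pirate_crew : Prop := ∀ (group_sizes : List Int), Dom_organize_pirate_crew group_sizes → Pre_organize_pirate_crew group_sizes → Spec_organize_pirate_crew group_sizes (organize_pirate_crew group_sizes)

-- ===== LEMMAS AND PROOFS =====

def pvF (q : Int × List (List Int)) : Int × PySem.Dict Int (List Int) :=
  (q.1, PySem.Dict.mk (PySem.List.enumerate q.2 0))

-- the correspondence: A's inner dict for a size is B's bucket list, enumerated from 0
def pvConv (d : PySem.Dict Int (List (List Int))) : PySem.Dict Int (PySem.Dict Int (List Int)) :=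
  PySem.Dict.mk (d.items.map pvF)

-- invariant on one of B's bucket lists: nonempty, all but the last bucket exactly full,
-- the last bucket holds at most s pirates
def pvGood (s : Int) (bs : List (List Int)) : Prop :=
  bs ≠ [] ∧ (∀ b ∈ bs.dropLast, (b.length : Int) = s) ∧ (((bs.getLast?.getD []).length : Int)) ≤ s

theorem pv_get?_mk_map (l : List (Int × List (List Int))) (s : Int) :
    (PySem.Dict.mk (l.map pvF)).get? s
      = ((PySem.Dict.mk l).get? s).map (fun bs => PySem.Dict.mk (PySem.List.enumerate bs 0)) := by
  induction l with
  | nil => simp [PySem.Dict.get?]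
  | cons q rest ih =>
    simp only [List.map_cons, pvF]
    rw [PySem.Dict.get?_mk_cons, PySem.Dict.get?_mk_cons]
    by_cases h : (q.1 == s) = true
    · simp [h]
    · simp only [eq_false_of_ne_true h, Bool.false_eq_true, if_false, ih]

theorem pv_get?_mk_enumerate (bs : List (List Int)) : ∀ (k i : Int),
    (PySem.Dict.mk (PySem.List.enumerate bs k)).get? i
      = if k ≤ i ∧ i < k + bs.length then some (bs.getD (i - k).toNat []) else none := by
  induction bs with
  | nil =>
    intro k i
    have h3 : ¬ (k ≤ i ∧ i < k + (([] : List (List Int)).length : Int)) := by simp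
    rw [if_neg h3]; simp [PySem.List.enumerate, PySem.Dict.get?]
  | cons b rest ih =>
    intro k i
    rw [PySem.List.enumerate_cons, PySem.Dict.get?_mk_cons]
    by_cases h : k = i
    · subst h
      have h3 : k ≤ k ∧ k < k + (((b :: rest).length : Nat) : Int) := by
        refine ⟨le_refl _, ?_⟩; simp
      rw [if_pos h3]; simp
    · have hne : (k == i) = false := by simp [h]
      rw [hne, ih (k+1) i]
      by_cases h2 : k + 1 ≤ i ∧ i < k + 1 + rest.length
      · have h3 : k ≤ i ∧ i < k + (((b :: rest).length : Nat) : Int) := by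
          simp only [List.length_cons] at *; push_cast at *; omega
        rw [if_pos h2, if_pos h3]
        have : (i - k).toNat = (i - (k+1)).toNat + 1 := by omega
        simp [this]
      · have h3 : ¬ (k ≤ i ∧ i < k + (((b :: rest).length : Nat) : Int)) := by
          simp only [List.length_cons] at *; push_cast at *; omega
        rw [if_neg h2, if_neg h3]
        simp [Bool.false_eq_true]

theorem pv_enumerate_concat (bs : List (List Int)) : ∀ (k : Int) (w : List Int),
    PySem.List.enumerate (bs ++ [w]) k = PySem.List.enumerate bs k ++ [(k + bs.length, w)] := by
  induction bs with
  | nil => intro k w; simp [PySem.List.enumerate_cons, PySem.List.enumerate]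
  | cons b rest ih =>
    intro k w
    simp [PySem.List.enumerate_cons, ih]
    ring_nf

theorem pv_getLast_getD (bs : List (List Int)) (h : bs ≠ []) :
    bs.getLast?.getD [] = bs.getD (bs.length - 1) [] := by
  have hl : 0 < bs.length := List.length_pos_iff.mpr h
  rw [List.getLast?_eq_getElem?]
  simp [List.getD, List.getElem?_eq_getElem (by omega : bs.length - 1 < bs.length)]

theorem pv_set_last (bs : List (List Int)) (h : bs ≠ []) (w : List Int) :
    bs.set (bs.length - 1) w = bs.dropLast ++ [w] := by
  induction bs with
  | nil => simp at h
  | cons b rest ih =>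
    cases rest with
    | nil => simp
    | cons c t =>
      have := ih (by simp)
      simp only [List.length_cons, Nat.add_sub_cancel] at this ⊢
      rw [List.set_cons_succ]
      · simp only [List.dropLast_cons_of_ne_nil (by simp : (c :: t) ≠ [])]
        rw [this]; rfl

theorem pv_fst_enumerate_ge (bs : List (List Int)) (k : Int) :
    ∀ q ∈ PySem.List.enumerate bs k, k ≤ q.1 := by
  intro q hq
  have h1 : q.1 ∈ (PySem.List.enumerate bs k).map (·.1) := List.mem_map_of_mem hq
  rw [PySem.List.map_fst_enumerate] at h1
  exact (PySem.List.mem_pyRange_one.mp h1).1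

theorem pv_enumerate_replace (bs : List (List Int)) : ∀ (k : Int) (j : Nat), j < bs.length → ∀ (w : List Int),
    (PySem.List.enumerate bs k).map (fun q => if q.1 == k + (j : Int) then (k + (j : Int), w) else q)
      = PySem.List.enumerate (bs.set j w) k := by
  induction bs with
  | nil => intro k j hj; simp at hj
  | cons b rest ih =>
    intro k j hj w
    rw [PySem.List.enumerate_cons, List.map_cons]
    cases j with
    | zero =>
      simp only [Nat.cast_zero, add_zero, beq_self_eq_true, if_pos, List.set_cons_zero,
        PySem.List.enumerate_cons]
      congr 1
      have : ∀ q ∈ PySem.List.enumerate rest (k+1),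
          (if q.1 == k then (k, w) else q) = q := by
        intro q hq
        have := pv_fst_enumerate_ge rest (k+1) q hq
        have hne : (q.1 == k) = false := by simp; omega
        simp [hne]
      rw [List.map_congr_left this, List.map_id']
    | succ j' =>
      have hne : (k == k + ((j'+1 : Nat) : Int)) = false := by simp; omega
      rw [hne]
      simp only [Bool.false_eq_true, if_false, List.set_cons_succ, PySem.List.enumerate_cons]
      congr 1
      have harg : k + ((j'+1 : Nat) : Int) = (k+1) + (j' : Int) := by push_cast; ring
      rw [harg]
      exact ih (k+1) j' (by simpa using hj) w

theorem pv_contains_mk_enumerate (bs : List (List Int)) (i : Int) :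
    (PySem.Dict.mk (PySem.List.enumerate bs 0)).contains i
      = decide (0 ≤ i ∧ i < bs.length) := by
  rw [PySem.Dict.contains_eq_isSome_get?, pv_get?_mk_enumerate]
  by_cases h : (0:Int) ≤ i ∧ i < 0 + bs.length
  · rw [if_pos h]; simp; omega
  · rw [if_neg h]; simp at h ⊢; omega

theorem pv_mkEnum_insert_fresh (bs : List (List Int)) (w : List Int) :
    (PySem.Dict.mk (PySem.List.enumerate bs 0)).insert (bs.length : Int) w
      = PySem.Dict.mk (PySem.List.enumerate (bs ++ [w]) 0) := by
  apply PySem.Dict.ext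
  rw [PySem.Dict.items_insert_of_not_contains]
  · rw [pv_enumerate_concat]
    simp
  · rw [pv_contains_mk_enumerate]; simp

theorem pv_mkEnum_insert_set (bs : List (List Int)) (j : Nat) (hj : j < bs.length) (w : List Int) :
    (PySem.Dict.mk (PySem.List.enumerate bs 0)).insert (j : Int) w
      = PySem.Dict.mk (PySem.List.enumerate (bs.set j w) 0) := by
  apply PySem.Dict.ext
  rw [PySem.Dict.items_insert_of_contains]
  · have := pv_enumerate_replace bs 0 j hj w
    simp only [zero_add] at this
    simpa using this
  · rw [pv_contains_mk_enumerate]; simp; omega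

theorem pvFindBucket_skip (s : Int) (t : Nat) : ∀ (fuel : Nat) (b : Int) (inner : PySem.Dict Int (List Int)),
    t ≤ fuel →
    (∀ j : Nat, j < t → inner.contains (b + j) = true ∧ s ≤ ((inner.getD (b + j) []).length : Int)) →
    pvFindBucket s fuel b inner = pvFindBucket s (fuel - t) (b + t) inner := by
  induction t with
  | zero => intro fuel b inner _ _; simp
  | succ t' ih =>
    intro fuel b inner hle hfull
    obtain ⟨f, rfl⟩ : ∃ f, fuel = f + 1 := ⟨fuel - 1, by omega⟩
    have h0 := hfull 0 (by omega)
    simp only [Nat.cast_zero, add_zero] at h0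
    show (let inner' := if inner.contains b then inner else inner.insert b [];
      if s ≤ ((inner'.getD b []).length : Int) then pvFindBucket s f (b+1) inner'
      else (b, inner')) = _
    rw [if_pos h0.1]
    · simp only
      rw [if_pos h0.2, ih f (b+1) inner (by omega) ?_]
      · congr 1
        · omega
        · push_cast; ring
      · intro j hj
        have := hfull (j+1) (by omega)
        have harg : b + 1 + (j : Int) = b + ((j+1 : Nat) : Int) := by push_cast; ring
        rw [harg]; exact this

theorem pvFindBucket_enum (s : Int) (hs : 1 ≤ s) (bs : List (List Int)) (hG : pvGood s bs) :
    pvFindBucket s (bs.length + 1) 0 (PySem.Dict.mk (PySem.List.enumerate bs 0))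
      = (if s ≤ (((bs.getLast?.getD []).length : Int)) then
           ((bs.length : Int), (PySem.Dict.mk (PySem.List.enumerate bs 0)).insert (bs.length : Int) [])
         else
           ((bs.length : Int) - 1, PySem.Dict.mk (PySem.List.enumerate bs 0))) := by
  obtain ⟨hne, hfull, hlast⟩ := hG
  have hlen : 0 < bs.length := List.length_pos_iff.mpr hne
  set inner := PySem.Dict.mk (PySem.List.enumerate bs 0) with hinner
  have hget : ∀ j : Nat, j < bs.length → inner.getD ((j : Int)) [] = bs.getD j [] := by
    intro j hj
    rw [PySem.Dict.getD_eq_get?_getD, hinner, pv_get?_mk_enumerate]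
    rw [if_pos (by refine ⟨by omega, ?_⟩; simp; omega)]
    simp
  have hskip := pvFindBucket_skip s (bs.length - 1) (bs.length + 1) 0 inner (by omega) ?_
  · rw [hskip]
    have hf : bs.length + 1 - (bs.length - 1) = 2 := by omega
    rw [hf]
    have hcont : inner.contains (0 + ((bs.length - 1 : Nat) : Int)) = true := by
      rw [hinner, pv_contains_mk_enumerate]; simp; omega
    have hgetl : inner.getD (0 + ((bs.length - 1 : Nat) : Int)) [] = bs.getLast?.getD [] := by
      rw [zero_add, hget _ (by omega), pv_getLast_getD bs hne]
    simp only [pvFindBucket, hcont, if_true, hgetl]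
    by_cases hfull2 : s ≤ (((bs.getLast?.getD []).length : Int))
    · rw [if_pos hfull2, if_pos hfull2]
      have hb : (0 + ((bs.length - 1 : Nat) : Int) + 1) = (bs.length : Int) := by push_cast; omega
      rw [hb]
      have hcont2 : inner.contains ((bs.length : Nat) : Int) = false := by
        rw [hinner, pv_contains_mk_enumerate]; simp
      simp only [pvFindBucket, hcont2, Bool.false_eq_true, if_false]
      rw [PySem.Dict.getD_eq_get?_getD, PySem.Dict.get?_insert_self]
      have hc : ¬ s ≤ ((((some ([] : List Int)).getD []).length : Int)) := by simp; omega
      rw [if_neg hc]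
    · rw [if_neg hfull2, if_neg hfull2]
      congr 1
      push_cast; omega
  · intro j hj
    constructor
    · rw [hinner, pv_contains_mk_enumerate]; simp; omega
    · rw [zero_add, hget j (by omega)]
      have hjd : j < bs.dropLast.length := by simp; omega
      have hmem : bs.getD j [] ∈ bs.dropLast := by
        have heq : bs.getD j [] = bs.dropLast.getD j [] := by
          simp [List.getD, List.getElem?_eq_getElem (by omega : j < bs.length),
            List.getElem?_eq_getElem hjd, List.getElem_dropLast]
        rw [heq, List.getD, List.getElem?_eq_getElem hjd]
        exact List.getElem_mem _
      rw [hfull _ hmem]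

theorem pv_get?_conv (d : PySem.Dict Int (List (List Int))) (s : Int) :
    (pvConv d).get? s = (d.get? s).map (fun bs => PySem.Dict.mk (PySem.List.enumerate bs 0)) := by
  have := pv_get?_mk_map d.items s
  simpa [pvConv] using this

theorem pv_contains_conv (d : PySem.Dict Int (List (List Int))) (s : Int) :
    (pvConv d).contains s = d.contains s := by
  rw [PySem.Dict.contains_eq_isSome_get?, PySem.Dict.contains_eq_isSome_get?, pv_get?_conv]
  cases d.get? s <;> simp

theorem pv_conv_insert (d : PySem.Dict Int (List (List Int))) (s : Int) (bs2 : List (List Int)) :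
    pvConv (d.insert s bs2) = (pvConv d).insert s (PySem.Dict.mk (PySem.List.enumerate bs2 0)) := by
  apply PySem.Dict.ext
  by_cases hc : d.contains s = true
  · rw [show (pvConv (d.insert s bs2)).items = (d.insert s bs2).items.map pvF from rfl,
      PySem.Dict.items_insert_of_contains d bs2 hc,
      PySem.Dict.items_insert_of_contains (pvConv d) _ (by rw [pv_contains_conv]; exact hc)]
    rw [show (pvConv d).items = d.items.map pvF from rfl]
    rw [List.map_map, List.map_map]
    apply List.map_congr_left
    intro q _
    by_cases hqs : q.1 = s <;> simp [pvF, hqs]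
  · have hc' : d.contains s = false := by simpa using hc
    rw [show (pvConv (d.insert s bs2)).items = (d.insert s bs2).items.map pvF from rfl,
      PySem.Dict.items_insert_of_not_contains d bs2 hc',
      PySem.Dict.items_insert_of_not_contains (pvConv d) _ (by rw [pv_contains_conv]; exact hc')]
    simp [pvF, pvConv]

theorem pv_stepB_none (d : PySem.Dict Int (List (List Int))) (p : Int × Int)
    (h : d.get? p.2 = none) : pvStepB d p = d.insert p.2 [[p.1]] := by
  unfold pvStepB
  rw [PySem.Dict.getD_eq_get?_getD, h]
  simp only [Option.getD_none]
  rw [if_pos (Or.inl trivial), PySem.List.pyGetD_neg_one_append_singleton]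
  simp

theorem pv_stepB_full (d : PySem.Dict Int (List (List Int))) (p : Int × Int) (bs : List (List Int))
    (h : d.get? p.2 = some bs) (hne : bs ≠ [])
    (hfull2 : p.2 ≤ (((bs.getLast?.getD []).length : Int))) :
    pvStepB d p = d.insert p.2 (bs ++ [[p.1]]) := by
  unfold pvStepB
  rw [PySem.Dict.getD_eq_get?_getD, h]
  simp only [Option.getD_some]
  have hlastD : PySem.List.pyGetD bs (-1) [] = bs.getLast?.getD [] := by
    rw [PySem.List.pyGetD_neg_one bs [] hne, List.getLast?_eq_some_getLast hne]; simp
  rw [if_pos (Or.inr (by rw [hlastD]; exact hfull2))]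
  congr 1
  rw [List.dropLast_concat, PySem.List.pyGetD_neg_one_append_singleton]
  simp

theorem pv_stepB_notfull (d : PySem.Dict Int (List (List Int))) (p : Int × Int) (bs : List (List Int))
    (h : d.get? p.2 = some bs) (hne : bs ≠ [])
    (hnf : ¬ p.2 ≤ (((bs.getLast?.getD []).length : Int))) :
    pvStepB d p = d.insert p.2 (bs.dropLast ++ [bs.getLast?.getD [] ++ [p.1]]) := by
  unfold pvStepB
  rw [PySem.Dict.getD_eq_get?_getD, h]
  simp only [Option.getD_some]
  have hlastD : PySem.List.pyGetD bs (-1) [] = bs.getLast?.getD [] := by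
    rw [PySem.List.pyGetD_neg_one bs [] hne, List.getLast?_eq_some_getLast hne]; simp
  rw [if_neg (by push_neg; refine ⟨hne, ?_⟩; rw [hlastD]; omega)]
  rw [hlastD]

theorem pv_stepA_conv (d : PySem.Dict Int (List (List Int))) (p : Int × Int)
    (hs : 1 ≤ p.2) (hnd : d.keys.Nodup) (hG : ∀ q ∈ d.items, pvGood q.1 q.2) :
    pvStepA (pvConv d) p = pvConv (pvStepB d p) := by
  cases h : d.get? p.2 with
  | none =>
    have hA : pvStepA (pvConv d) p
        = (pvConv d).insert p.2 (PySem.Dict.mk (PySem.List.enumerate [[p.1]] 0)) := by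
      simp only [pvStepA]
      rw [PySem.Dict.getD_eq_get?_getD, pv_get?_conv, h]
      simp only [Option.map_none, Option.getD_none]
      have hfind : pvFindBucket p.2 ((PySem.Dict.empty : PySem.Dict Int (List Int)).size + 1) 0
          PySem.Dict.empty = (0, PySem.Dict.empty.insert 0 []) := by
        show pvFindBucket p.2 1 0 PySem.Dict.empty = _
        simp only [pvFindBucket, PySem.Dict.contains_empty, Bool.false_eq_true, if_false]
        rw [PySem.Dict.getD_eq_get?_getD, PySem.Dict.get?_insert_self]
        rw [if_neg (by simp; omega)]
      rw [hfind]
      simp only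
      rw [PySem.Dict.getD_eq_get?_getD, PySem.Dict.get?_insert_self]
      simp only [Option.getD_some]
      rw [PySem.Dict.insert_insert_self]
      exact congrArg _ (pv_mkEnum_insert_fresh [] [p.1])
    rw [hA, pv_stepB_none d p h, pv_conv_insert]
  | some bs =>
    have hmem : (p.2, bs) ∈ d.items := PySem.Dict.mem_items_of_get?_eq_some _ h
    obtain ⟨hne, hfull, hlast⟩ := hG _ hmem
    dsimp only at hne hfull hlast
    have hlen : 0 < bs.length := List.length_pos_iff.mpr hne
    have hA0 : (pvConv d).getD p.2 PySem.Dict.empty = PySem.Dict.mk (PySem.List.enumerate bs 0) := by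
      rw [PySem.Dict.getD_eq_get?_getD, pv_get?_conv, h]; rfl
    have hsize : (PySem.Dict.mk (PySem.List.enumerate bs 0)).size = bs.length := by
      simp [PySem.Dict.size, PySem.List.length_enumerate]
    by_cases hfull2 : p.2 ≤ (((bs.getLast?.getD []).length : Int))
    · have hA : pvStepA (pvConv d) p
          = (pvConv d).insert p.2 (PySem.Dict.mk (PySem.List.enumerate (bs ++ [[p.1]]) 0)) := by
        simp only [pvStepA]
        rw [hA0, hsize, pvFindBucket_enum p.2 hs bs ⟨hne, hfull, hlast⟩, if_pos hfull2]
        simp only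
        rw [PySem.Dict.getD_eq_get?_getD, PySem.Dict.get?_insert_self]
        simp only [Option.getD_some]
        rw [PySem.Dict.insert_insert_self]
        congr 1
        have := pv_mkEnum_insert_fresh bs [p.1]
        simpa using this
      rw [hA, pv_stepB_full d p bs h hne hfull2, pv_conv_insert]
    · have hA : pvStepA (pvConv d) p
          = (pvConv d).insert p.2 (PySem.Dict.mk
              (PySem.List.enumerate (bs.dropLast ++ [bs.getLast?.getD [] ++ [p.1]]) 0)) := by
        simp only [pvStepA]
        rw [hA0, hsize, pvFindBucket_enum p.2 hs bs ⟨hne, hfull, hlast⟩, if_neg hfull2]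
        simp only
        have hidx : ((bs.length : Int) - 1) = (((bs.length - 1 : Nat)) : Int) := by omega
        have hgd : (PySem.Dict.mk (PySem.List.enumerate bs 0)).getD ((bs.length : Int) - 1) []
            = bs.getLast?.getD [] := by
          rw [PySem.Dict.getD_eq_get?_getD, pv_get?_mk_enumerate]
          rw [if_pos (by refine ⟨by omega, ?_⟩; omega)]
          rw [pv_getLast_getD bs hne]
          simp only [Option.getD_some]
          congr 1
          omega
        rw [hgd, hidx, pv_mkEnum_insert_set bs (bs.length - 1) (by omega) _]
        rw [pv_set_last bs hne]
      rw [hA, pv_stepB_notfull d p bs h hne hfull2, pv_conv_insert]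

theorem pv_good_step (d : PySem.Dict Int (List (List Int))) (p : Int × Int)
    (hs : 1 ≤ p.2) (hnd : d.keys.Nodup) (hG : ∀ q ∈ d.items, pvGood q.1 q.2) :
    ∀ q ∈ (pvStepB d p).items, pvGood q.1 q.2 := by
  intro q hq
  cases h : d.get? p.2 with
  | none =>
    rw [pv_stepB_none d p h, PySem.Dict.mem_items_insert] at hq
    rcases hq with hq | ⟨hq, _⟩
    · subst hq
      refine ⟨by simp, by simp, by simp; omega⟩
    · exact hG _ hq
  | some bs =>
    have hmem : (p.2, bs) ∈ d.items := PySem.Dict.mem_items_of_get?_eq_some _ h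
    obtain ⟨hne, hfull, hlast⟩ := hG _ hmem
    dsimp only at hne hfull hlast
    by_cases hfull2 : p.2 ≤ (((bs.getLast?.getD []).length : Int))
    · rw [pv_stepB_full d p bs h hne hfull2, PySem.Dict.mem_items_insert] at hq
      rcases hq with hq | ⟨hq, _⟩
      · subst hq
        refine ⟨by simp, ?_, by simp; omega⟩
        intro b hb
        rw [List.dropLast_concat] at hb
        have hsplit : b ∈ bs.dropLast ++ [bs.getLast hne] := by
          rw [List.dropLast_append_getLast hne]; exact hb
        rcases List.mem_append.mp hsplit with hb' | hb'
        · exact hfull _ hb'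
        · have hbe : b = bs.getLast hne := by simpa using hb'
          subst hbe
          have hge : ((bs.getLast?.getD []).length : Int) = ((bs.getLast hne).length : Int) := by
            rw [List.getLast?_eq_some_getLast hne]; simp
          omega
      · exact hG _ hq
    · rw [pv_stepB_notfull d p bs h hne hfull2, PySem.Dict.mem_items_insert] at hq
      rcases hq with hq | ⟨hq, _⟩
      · subst hq
        refine ⟨by simp, ?_, by simp; omega⟩
        intro b hb
        rw [List.dropLast_concat] at hb
        exact hfull _ hb
      · exact hG _ hq

theorem pv_loop (l : List (Int × Int)) : ∀ (d : PySem.Dict Int (List (List Int))),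
    (∀ p ∈ l, 1 ≤ p.2) → d.keys.Nodup → (∀ q ∈ d.items, pvGood q.1 q.2) →
    l.foldl pvStepA (pvConv d) = pvConv (l.foldl pvStepB d) := by
  induction l with
  | nil => intro d _ _ _; rfl
  | cons p t ih =>
    intro d hl hnd hG
    rw [List.foldl_cons, List.foldl_cons,
      pv_stepA_conv d p (hl p (by simp)) hnd hG]
    apply ih
    · intro q hq; exact hl q (by simp [hq])
    · cases hc : d.get? p.2 with
      | none =>
        rw [pv_stepB_none d p hc]
        exact PySem.Dict.nodup_keys_insert _ _ _ hnd
      | some bs =>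
        have hmem : (p.2, bs) ∈ d.items := PySem.Dict.mem_items_of_get?_eq_some _ hc
        obtain ⟨hne, _, _⟩ := hG _ hmem
        by_cases hfull2 : p.2 ≤ (((bs.getLast?.getD []).length : Int))
        · rw [pv_stepB_full d p bs hc hne hfull2]
          exact PySem.Dict.nodup_keys_insert _ _ _ hnd
        · rw [pv_stepB_notfull d p bs hc hne hfull2]
          exact PySem.Dict.nodup_keys_insert _ _ _ hnd
    · exact pv_good_step d p (hl p (by simp)) hnd hG

theorem pv_output (d : PySem.Dict Int (List (List Int))) :
    (pvConv d).items.foldl (fun res q => q.2.items.foldl (fun res r => res ++ [r.2]) res) []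
      = d.values.flatMap id := by
  have h1 : (pvConv d).items.foldl
        (fun res q => q.2.items.foldl (fun res r => res ++ [r.2]) res) []
      = (pvConv d).items.foldl (fun res q => res ++ q.2.items.map (·.2)) [] := by
    apply PySem.List.foldl_congr_mem
    intro res q _
    exact PySem.List.foldl_append_singleton_eq_map _ _ _
  rw [h1, PySem.List.foldl_append_eq_flatMap]
  simp [pvConv, pvF, PySem.Dict.values, List.flatMap_map, PySem.List.map_snd_enumerate]

-- ===== VERDICT (by name: the statement is the Claim_ definition above) =====
theorem organize_pirate_crew_spec : Claim_equal_organize_pirate_crew := by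
  intro gs _ hpre
  unfold Spec_organize_pirate_crew organize_pirate_crew organize_pirate_crew_alt
  have hl : ∀ p ∈ PySem.List.enumerate gs 0, 1 ≤ p.2 := by
    intro p hp
    have : p.2 ∈ gs := by
      have := PySem.List.map_snd_enumerate gs 0
      exact this ▸ List.mem_map_of_mem hp
    exact hpre _ this
  have h0 : pvConv PySem.Dict.empty = (PySem.Dict.empty : PySem.Dict Int (PySem.Dict Int (List Int))) := rfl
  rw [← h0, pv_loop _ _ hl (by simp [PySem.Dict.empty, PySem.Dict.keys]) (by simp [PySem.Dict.empty]),
      pv_output]
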